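-- pv_equiv track=rewrite | github.com/rezajam/tweets | tweetOfficial.py | _unique_tags_
-- ===== SOURCE A (Python) =====
-- def _unique_tags_(cadidate_tags, tweet_tags):
--     '''(dict of {str: list of str}, list of str) -> dict of {str: list of str}
--
--     Return a dictionary containing the candidate names as key and the unique
--     hashtags used by them as value. Return empty dictionary if it couldnt find
--     any.
--
--     >>> _unique_tags_({"Soroush Motesharei": ["metal", "slipknot", "saynotowar"
--     , "iran", "tehran"], "Jennifer Lawrence": ["love", "soroush", "oscar",
--     "election"], "Mike Ross": ["law","ny"]},["iraq", "middleEast", "Oil"])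
--     {}
--
--     >>> _unique_tags_({"microsoft":["netFramework", "C", "windows", "office"],
--     "google":["android", "office"], "Dell":["laptop", "xps"]}, ["programming",
--     "office", "netFramework"])
--     {'microsoft': ['netFramework']}
--
--     >>> _unique_tags_({"Marilyn Manson":["evidence", "absinthe", "art", "music"]
--     , "mozart":["confutatis", "money", "king", "music"], "insomnium":["tour",
--     "wintersgate", "art"]},["art", "music", "money", "wintersgate"])
--     {'mozart': ['money'], 'insomnium': ['wintersgate']}
--     '''
--     empty_candidates = []
--     for key in cadidate_tags:
--         common_tags = []
--         for i in tweet_tags: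
--             if i in cadidate_tags[key]: common_tags.append(i)
--         cadidate_tags[key] =  common_tags
--     for j in tweet_tags:
--         count = 0
--         for tag in cadidate_tags:
--             if j in cadidate_tags[tag]:
--                 count += 1
--         if count > 1:
--             for delete in cadidate_tags:
--                 if j in cadidate_tags[delete]:
--                     cadidate_tags[delete].remove(j)
--     for empty in cadidate_tags:
--         if len(cadidate_tags[empty]) == 0: empty_candidates.append(empty)
--     for name in empty_candidates: del cadidate_tags[name]
--     return cadidate_tags
-- ===== SOURCE B (Python) =====
-- def _unique_tags_(cadidate_tags, tweet_tags):
--     owner_count = {}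
--     for t in tweet_tags:
--         if t not in owner_count:
--             owner_count[t] = sum(1 for tags in cadidate_tags.values() if t in tags)
--     for name in list(cadidate_tags):
--         kept = [t for t in tweet_tags
--                 if t in cadidate_tags[name] and owner_count[t] == 1]
--         if kept:
--             cadidate_tags[name] = kept
--         else:
--             del cadidate_tags[name]
--     return cadidate_tags
-- ===== Notes on version B (the rewrite author's own statement) =====
-- stated objective: simpler
-- what changed: B precomputes an owner-count table (one membership scan over the candidate lists per distinct tweet tag) and builds each candidate's final value in a single comprehension, instead of A's three passes that intersect every list, then for every tweet-tag occurrence rescan all candidates and list.remove the tag from each, then collect and delete empty keys.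
import Mathlib
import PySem

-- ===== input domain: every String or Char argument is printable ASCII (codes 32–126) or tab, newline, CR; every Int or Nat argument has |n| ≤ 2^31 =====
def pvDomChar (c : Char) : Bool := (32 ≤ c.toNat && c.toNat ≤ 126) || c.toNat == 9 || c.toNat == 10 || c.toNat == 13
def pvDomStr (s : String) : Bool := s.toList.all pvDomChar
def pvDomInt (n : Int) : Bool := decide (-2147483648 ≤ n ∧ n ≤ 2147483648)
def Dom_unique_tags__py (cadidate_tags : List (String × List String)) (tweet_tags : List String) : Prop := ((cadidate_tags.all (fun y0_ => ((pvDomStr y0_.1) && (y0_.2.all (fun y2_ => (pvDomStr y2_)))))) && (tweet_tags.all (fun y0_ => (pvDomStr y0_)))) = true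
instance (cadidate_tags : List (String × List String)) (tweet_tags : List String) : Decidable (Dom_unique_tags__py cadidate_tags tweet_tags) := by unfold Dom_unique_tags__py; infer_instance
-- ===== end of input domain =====

-- B replaces A's per-tag removal passes by a precomputed owner-count table and one
-- construction pass per candidate (objective: simpler; a timing run also measured B faster).  Both A and B mutate the dict
-- argument in place in Python (B performs the same observable mutation as A); the
-- equivalence proved here is about the returned dict (= the mutated argument).

-- ===== PORT A =====
def unique_tags__py (cadidate_tags : List (String × List String)) (tweet_tags : List String) : List (String × List String) :=
  let d0 : PySem.Dict String (List String) := PySem.Dict.mk cadidate_tags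
  -- for key in cadidate_tags: common_tags = [...]; cadidate_tags[key] = common_tags
  let d1 := d0.keys.foldl (fun d key =>
      let common := tweet_tags.foldl (fun cs i =>
          if (d.getD key []).contains i then cs ++ [i] else cs) ([] : List String)
      d.insert key common) d0
  -- for j in tweet_tags: count ...; if count > 1: remove j from every candidate containing it
  let d2 := tweet_tags.foldl (fun d j =>
      let count := d.keys.foldl (fun c tag =>
          if (d.getD tag []).contains j then c + 1 else c) (0 : Int)
      if 1 < count then
        d.keys.foldl (fun d' del =>
            if (d'.getD del []).contains j then d'.insert del ((d'.getD del []).erase j) else d') d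
      else d) d1
  -- collect empty candidates, then delete them
  let empties := d2.keys.foldl (fun es e =>
      if (d2.getD e []).length == 0 then es ++ [e] else es) ([] : List String)
  (empties.foldl (fun d name => d.erase name) d2).items

-- ===== PORT B =====
def unique_tags__py_alt (cadidate_tags : List (String × List String)) (tweet_tags : List String) : List (String × List String) :=
  let d0 : PySem.Dict String (List String) := PySem.Dict.mk cadidate_tags
  -- owner_count[t] = number of candidates whose list contains t
  let oc := tweet_tags.foldl (fun oc t =>
      if oc.contains t then oc
      else oc.insert t (d0.values.foldl (fun c tags =>
          if tags.contains t then c + 1 else c) (0 : Int)))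
    (PySem.Dict.empty : PySem.Dict String Int)
  -- for name in list(cadidate_tags): keep its uniquely-owned tweet tags or delete it
  (d0.keys.foldl (fun d name =>
      let kept := tweet_tags.filter (fun t =>
          (d.getD name []).contains t && (oc.getD t 0 == 1))
      if kept.isEmpty then d.erase name else d.insert name kept) d0).items

-- ===== PRECONDITION & SPEC =====
-- Pre_ excludes association lists with duplicate keys: they do not denote a Python dict
-- (dict construction silently keeps only the last value per key), so A's behaviour on
-- them is an artefact of the encoding.
def Pre_unique_tags__py (cadidate_tags : List (String × List String)) (tweet_tags : List String) : Prop :=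
  (cadidate_tags.map Prod.fst).Nodup
instance (cadidate_tags : List (String × List String)) (tweet_tags : List String) : Decidable (Pre_unique_tags__py cadidate_tags tweet_tags) := by unfold Pre_unique_tags__py; infer_instance
def pvWitness_unique_tags__py : (List (String × List String)) × List String :=
  ([("microsoft", ["netFramework", "C", "windows", "office"]), ("google", ["android", "office"]), ("Dell", ["laptop", "xps"])], ["programming", "office", "netFramework"])

def Spec_unique_tags__py (cadidate_tags : List (String × List String)) (tweet_tags : List String) (out : List (String × List String)) : Prop := out = unique_tags__py_alt cadidate_tags tweet_tags
instance (cadidate_tags : List (String × List String)) (tweet_tags : List String) (out : List (String × List String)) : Decidable (Spec_unique_tags__py cadidate_tags tweet_tags out) := by unfold Spec_unique_tags__py; infer_instance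

-- ===== CLAIM (what is proved, stated in full; the proofs are below) =====
def Claim_equal_unique_tags__py : Prop := ∀ (cadidate_tags : List (String × List String)) (tweet_tags : List String), Dom_unique_tags__py cadidate_tags tweet_tags → Pre_unique_tags__py cadidate_tags tweet_tags → Spec_unique_tags__py cadidate_tags tweet_tags (unique_tags__py cadidate_tags tweet_tags)

-- ===== LEMMAS AND PROOFS =====

-- number of candidates (entries of the original list) whose tag list contains t
def pvOwners (ct : List (String × List String)) (t : String) : Nat :=
  ct.countP (fun q => q.2.contains t)

-- t is owned by more than one candidate
def pvMulti (ct : List (String × List String)) (t : String) : Bool :=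
  decide (1 < pvOwners ct t)

-- the value a candidate with original list v ends with (before empties are dropped)
def pvKept (ct : List (String × List String)) (tweet : List String) (v : List String) : List String :=
  (tweet.filter (fun t => v.contains t)).filter (fun t => !pvMulti ct t)

-- list-level simulation of the removal passes: erase j from w once per multi-owned j in p
def pvEf (ct : List (String × List String)) (p : List String) (w : List String) : List String :=
  p.foldl (fun w j => if pvMulti ct j then w.erase j else w) w

-- optional per-key result as an items fragment
def pvToEnt (k : String) (o : Option (List String)) : List (String × List String) :=
  match o with
  | none => []
  | some w => [(k, w)]

theorem pvEf_count (ct : List (String × List String)) (p w : List String) (j : String) :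
    (pvEf ct p w).count j = w.count j - (if pvMulti ct j then p.count j else 0) := by
  induction p generalizing w with
  | nil => simp [pvEf]
  | cons i p ih =>
    have step : pvEf ct (i :: p) w = pvEf ct p (if pvMulti ct i then w.erase i else w) := by
      simp [pvEf]
    rw [step, ih]
    by_cases hji : j = i
    · subst hji
      by_cases hj : pvMulti ct j
      · simp only [hj, if_true, List.count_erase_self, List.count_cons_self]
        omega
      · simp [hj]
    · have hne : j ≠ i := hji
      by_cases hi : pvMulti ct i
      · simp only [hi, if_true, List.count_erase_of_ne hne, List.count_cons]
        simp [Ne.symm hne]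
      · simp only [hi, if_false, List.count_cons]
        simp [Ne.symm hne]

theorem pvEf_append (ct : List (String × List String)) (p w : List String) (j : String) :
    pvEf ct (p ++ [j]) w = if pvMulti ct j then (pvEf ct p w).erase j else pvEf ct p w := by
  simp [pvEf, List.foldl_append]

theorem pvFilterErase (q : String → Bool) (w : List String) (i : String) (hq : q i = false) :
    (w.erase i).filter q = w.filter q := by
  induction w with
  | nil => rfl
  | cons a w ih =>
    by_cases hai : a = i
    · subst hai
      simp [List.erase_cons_head, hq]
    · rw [List.erase_cons_tail (by simp [hai])]
      simp [List.filter_cons, ih]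

theorem pvEf_final (ct : List (String × List String)) (p w : List String)
    (h : ∀ j, pvMulti ct j = true → w.count j ≤ p.count j) :
    pvEf ct p w = w.filter (fun t => !pvMulti ct t) := by
  induction p generalizing w with
  | nil =>
    simp only [pvEf, List.foldl_nil]
    rw [eq_comm, List.filter_eq_self]
    intro a ha
    simp only [Bool.not_eq_eq_eq_not, Bool.not_true]
    by_contra hm
    have := h a (by simpa using hm)
    simp at this
    exact (List.count_eq_zero.mp this) ha
  | cons i p ih =>
    have step : pvEf ct (i :: p) w = pvEf ct p (if pvMulti ct i then w.erase i else w) := by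
      simp [pvEf]
    rw [step]
    by_cases hi : pvMulti ct i
    · simp only [hi, if_true]
      rw [ih, pvFilterErase _ _ _ (by simp [hi])]
      intro j hj
      have := h j hj
      by_cases hji : j = i
      · subst hji
        simp only [List.count_erase_self]
        simp [List.count_cons] at this
        omega
      · rw [List.count_erase_of_ne hji]
        simp [List.count_cons, Ne.symm hji] at this
        exact this
    · simp only [hi, if_false]
      apply ih
      intro j hj
      have := h j hj
      by_cases hji : j = i
      · subst hji; exact absurd hj (by simpa using hi)
      · simp [List.count_cons, Ne.symm hji] at this
        exact this

-- a key occurring once in an items list differs from every other key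
theorem pvKeySides (pre suf : List (String × List String)) (k : String) (v : List String)
    (h : ((pre ++ (k, v) :: suf).map Prod.fst).Nodup) :
    (∀ p ∈ pre, p.1 ≠ k) ∧ (∀ p ∈ suf, p.1 ≠ k) := by
  simp only [List.map_append, List.map_cons, List.nodup_append, List.nodup_cons] at h
  constructor
  · intro p hp he
    exact h.2.2 p.1 (List.mem_map_of_mem hp) k (List.mem_cons_self ..) he
  · intro p hp he
    exact h.2.1.1 (he ▸ List.mem_map_of_mem hp)

theorem pvMapNe (l : List (String × List String)) (k : String) (w : List String)
    (h : ∀ p ∈ l, p.1 ≠ k) :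
    l.map (fun p => if p.1 == k then (k, w) else p) = l := by
  induction l with
  | nil => rfl
  | cons a l ih =>
    simp only [List.map_cons]
    rw [if_neg (by simp [h a (List.mem_cons_self ..)]), ih (fun p hp => h p (List.mem_cons_of_mem a hp))]

-- replacing the value at the (unique) key k in an items list
theorem pvMapUpdate (pre suf : List (String × List String)) (k : String) (v w : List String)
    (h : ((pre ++ (k, v) :: suf).map Prod.fst).Nodup) :
    (pre ++ (k, v) :: suf).map (fun p => if p.1 == k then (k, w) else p) = pre ++ (k, w) :: suf := by
  obtain ⟨h1, h2⟩ := pvKeySides pre suf k v h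
  simp only [List.map_append, List.map_cons, beq_self_eq_true, if_true,
    pvMapNe pre k w h1, pvMapNe suf k w h2]

theorem pvFilterKeep (l : List (String × List String)) (k : String)
    (h : ∀ p ∈ l, p.1 ≠ k) : l.filter (fun p => !(p.1 == k)) = l := by
  rw [List.filter_eq_self]
  intro p hp
  simp [h p hp]

theorem pvFilterNe (pre suf : List (String × List String)) (k : String) (v : List String)
    (h : ((pre ++ (k, v) :: suf).map Prod.fst).Nodup) :
    (pre ++ (k, v) :: suf).filter (fun p => !(p.1 == k)) = pre ++ suf := by
  obtain ⟨h1, h2⟩ := pvKeySides pre suf k v h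
  simp only [List.filter_append, List.filter_cons, beq_self_eq_true, Bool.not_true,
    pvFilterKeep pre k h1, pvFilterKeep suf k h2]
  simp

-- master lemma: a fold over the keys that rewrites/deletes each key's own entry in place
theorem pvKeyfold (φ : PySem.Dict String (List String) → String → PySem.Dict String (List String))
    (g : String → List String → Option (List String))
    (hφ : ∀ pre k v suf, ((pre ++ (k, v) :: suf).map Prod.fst).Nodup →
      φ ⟨pre ++ (k, v) :: suf⟩ k = ⟨pre ++ pvToEnt k (g k v) ++ suf⟩) :
    ∀ (post pre : List (String × List String)), ((pre ++ post).map Prod.fst).Nodup →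
      (post.map Prod.fst).foldl φ ⟨pre ++ post⟩ = ⟨pre ++ post.flatMap (fun p => pvToEnt p.1 (g p.1 p.2))⟩ := by
  intro post
  induction post with
  | nil => intro pre _; simp
  | cons e rest ih =>
    intro pre hnd
    obtain ⟨k, v⟩ := e
    simp only [List.map_cons, List.foldl_cons]
    rw [hφ pre k v rest hnd]
    have hsub : ((pre ++ pvToEnt k (g k v) ++ rest).map Prod.fst).Nodup := by
      cases hg : g k v with
      | none =>
        simp only [pvToEnt, List.append_nil]
        refine List.Nodup.sublist ?_ hnd
        refine List.Sublist.map _ ?_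
        exact (List.append_sublist_append_left pre).mpr (List.sublist_cons_self _ _)
      | some wv =>
        simpa [pvToEnt] using hnd
    have hih := ih (pre ++ pvToEnt k (g k v)) hsub
    rw [hih]
    simp [List.append_assoc]

-- erasing a set of keys is one filter
theorem pvEraseFold (S : List String) (d : PySem.Dict String (List String)) :
    S.foldl (fun d name => d.erase name) d = ⟨d.items.filter (fun p => !(S.contains p.1))⟩ := by
  induction S generalizing d with
  | nil => simp
  | cons k S ih =>
    simp only [List.foldl_cons]
    rw [ih]
    apply PySem.Dict.ext
    simp only [PySem.Dict.erase, List.filter_filter]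
    apply List.filter_congr
    intro p _
    cases h1 : (p.1 == k) <;> cases h2 : S.contains p.1 <;>
      simp only [List.contains_cons, h1, h2, Bool.or_false, Bool.or_true,
        Bool.and_false, Bool.and_true, Bool.not_false, Bool.not_true] <;>
      simp_all

-- the per-key counting loop counts entries
theorem pvCountLoop (m : List (String × List String)) (j : String)
    (h : (m.map Prod.fst).Nodup) :
    (PySem.Dict.mk m).keys.foldl (fun c tag =>
        if ((PySem.Dict.mk m).getD tag []).contains j then c + 1 else c) (0 : Int)
      = (m.countP (fun p => p.2.contains j) : Int) := by
  have hk : (PySem.Dict.mk m).keys = m.map Prod.fst := rfl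
  rw [hk, List.foldl_map]
  rw [PySem.List.foldl_congr_mem m _ (fun c p => if p.2.contains j then c + 1 else c) 0
    (by
      intro acc x hx
      rw [PySem.Dict.getD_of_mem_items (PySem.Dict.mk m) (k := x.1) (v := x.2)
        (by simpa using hx) h []])]
  rw [PySem.List.foldl_count_if]
  simp

theorem pvFlatMapSome (m : List (String × List String)) (G : String × List String → List String) :
    m.flatMap (fun p => pvToEnt p.1 (some (G p))) = m.map (fun p => (p.1, G p)) := by
  induction m with
  | nil => rfl
  | cons e m ih =>
    simp only [List.flatMap_cons, List.map_cons, ih]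
    rfl

theorem pvFlatMapCongr (l : List (String × List String))
    (f g : String × List String → List (String × List String))
    (h : ∀ e ∈ l, f e = g e) : l.flatMap f = l.flatMap g := by
  induction l with
  | nil => rfl
  | cons e l ih =>
    simp only [List.flatMap_cons, h e (List.mem_cons_self ..),
      ih (fun x hx => h x (List.mem_cons_of_mem e hx))]

-- the state of A's removal loop
def pvState (ct : List (String × List String)) (tweet p : List String) : List (String × List String) :=
  ct.map (fun e => (e.1, pvEf ct p (tweet.filter (fun i => e.2.contains i))))

theorem pvPhase2 (ct : List (String × List String)) (tweet : List String)
    (hnd : (ct.map Prod.fst).Nodup) :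
    ∀ (q p : List String), p ++ q = tweet →
      q.foldl (fun (d : PySem.Dict String (List String)) j =>
        let count := d.keys.foldl (fun c tag =>
            if (d.getD tag []).contains j then c + 1 else c) (0 : Int)
        if 1 < count then
          d.keys.foldl (fun d' del =>
              if (d'.getD del []).contains j then d'.insert del ((d'.getD del []).erase j) else d') d
        else d) ⟨pvState ct tweet p⟩
      = ⟨ct.map (fun e => (e.1, pvKept ct tweet e.2))⟩ := by
  intro q
  induction q with
  | nil =>
    intro p hp
    simp only [List.foldl_nil, List.append_nil] at *
    subst hp
    unfold pvState
    congr 1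
    apply List.map_congr_left
    intro e _
    congr 1
    unfold pvKept
    apply pvEf_final
    intro j _
    exact List.Sublist.count_le j List.filter_sublist
  | cons j q ih =>
    intro p hp
    have hmnd : ((pvState ct tweet p).map Prod.fst).Nodup := by
      unfold pvState
      rw [List.map_map]
      exact hnd
    have hjc : p.count j < tweet.count j := by
      rw [← hp, List.count_append, List.count_cons_self]
      omega
    have hcontains : ∀ v : List String,
        (pvEf ct p (tweet.filter (fun i => v.contains i))).contains j = v.contains j := by
      intro v
      have hcnt := pvEf_count ct p (tweet.filter (fun i => v.contains i)) j
      cases hv : v.contains j with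
      | true =>
        have hjv : j ∈ v := by simpa using hv
        have hwc : (tweet.filter (fun i => v.contains i)).count j = tweet.count j := by
          rw [List.count_filter]
          simp [hjv]
        rw [hwc] at hcnt
        have hpos : 0 < (pvEf ct p (tweet.filter (fun i => v.contains i))).count j := by
          rw [hcnt]
          by_cases hm : pvMulti ct j
          · rw [if_pos hm]; omega
          · rw [if_neg hm]; omega
        simpa [List.count_pos_iff] using hpos
      | false =>
        have hwc : (tweet.filter (fun i => v.contains i)).count j = 0 :=
          List.count_eq_zero.mpr (fun hmem => by
            have hj2 : j ∈ v := by simpa using (List.mem_filter.mp hmem).2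
            exact absurd hj2 (by simpa using hv))
        rw [hwc] at hcnt
        have hz : (pvEf ct p (tweet.filter (fun i => v.contains i))).count j = 0 := by omega
        have hnm : j ∉ pvEf ct p (tweet.filter (fun i => v.contains i)) := List.count_eq_zero.mp hz
        cases hb : (pvEf ct p (tweet.filter (fun i => v.contains i))).contains j with
        | false => rfl
        | true => exact absurd (by simpa using hb) hnm
    have hcount : (pvState ct tweet p).countP (fun p => p.2.contains j) = pvOwners ct j := by
      unfold pvState pvOwners
      rw [List.countP_map]
      apply List.countP_congr
      intro e _
      simpa using hcontains e.2
    simp only [List.foldl_cons]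
    rw [pvCountLoop (pvState ct tweet p) j hmnd, hcount]
    by_cases hm : pvMulti ct j
    · have hgt : (1 : Int) < (pvOwners ct j : Int) := by
        have := of_decide_eq_true hm
        exact_mod_cast this
      rw [if_pos hgt]
      have hinner := pvKeyfold
        (fun d' del => if (d'.getD del []).contains j then d'.insert del ((d'.getD del []).erase j) else d')
        (fun k v => some (if v.contains j then v.erase j else v))
        (by
          intro pre k v suf hnd'
          have hget : (PySem.Dict.mk (pre ++ (k, v) :: suf)).getD k [] = v :=
            PySem.Dict.getD_of_mem_items _ (by simp) hnd' []
          cases hv : v.contains j with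
          | true =>
            simp only [hget, hv, if_true]
            apply PySem.Dict.ext
            have hcont : (PySem.Dict.mk (pre ++ (k, v) :: suf)).contains k = true := by
              rw [PySem.Dict.contains_iff_mem_keys]
              simp [PySem.Dict.keys]
            rw [PySem.Dict.items_insert_of_contains _ _ hcont]
            simp only [PySem.Dict.items]
            rw [pvMapUpdate pre suf k v (v.erase j) hnd']
            simp [pvToEnt]
          | false =>
            simp only [hget, hv, if_false]
            simp [pvToEnt])
        (pvState ct tweet p) []
        (by simpa using hmnd)
      simp only [List.nil_append] at hinner
      have hkeys : (PySem.Dict.mk (pvState ct tweet p)).keys = (pvState ct tweet p).map Prod.fst := rfl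
      rw [hkeys, hinner, pvFlatMapSome]
      have hstep : (pvState ct tweet p).map
            (fun p => (p.1, if p.2.contains j then p.2.erase j else p.2))
          = pvState ct tweet (p ++ [j]) := by
        unfold pvState
        rw [List.map_map]
        apply List.map_congr_left
        intro e _
        simp only [Function.comp_def]
        rw [pvEf_append, if_pos hm]
        congr 1
        by_cases hc : (pvEf ct p (tweet.filter (fun i => e.2.contains i))).contains j = true
        · rw [if_pos hc]
        · rw [if_neg hc]
          have hnm : j ∉ pvEf ct p (tweet.filter (fun i => e.2.contains i)) :=
            fun hmem => hc (List.elem_eq_true_of_mem hmem)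
          rw [List.erase_of_not_mem hnm]
      rw [hstep]
      exact ih (p ++ [j]) (by simpa using hp)
    · have hle : ¬ ((1 : Int) < (pvOwners ct j : Int)) := by
        intro hcontra
        apply hm
        simp only [pvMulti]
        exact decide_eq_true (by exact_mod_cast hcontra)
      rw [if_neg hle]
      have hstep : pvState ct tweet p = pvState ct tweet (p ++ [j]) := by
        unfold pvState
        apply List.map_congr_left
        intro e _
        rw [pvEf_append, if_neg hm]
      rw [hstep]
      exact ih (p ++ [j]) (by simpa using hp)

-- the memoised owner-count table agrees with the plain count on every looked-up key
theorem pvMemo (f : String → Int) :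
    ∀ (l : List String) (d : PySem.Dict String Int),
      (∀ t, d.contains t = true → d.getD t 0 = f t) →
      ∀ s, (s ∈ l ∨ d.contains s = true) →
        (l.foldl (fun oc t => if oc.contains t then oc else oc.insert t (f t)) d).getD s 0 = f s := by
  intro l
  induction l with
  | nil =>
    intro d hd s hs
    simp only [List.foldl_nil]
    exact hd s (hs.resolve_left (by simp))
  | cons t l ih =>
    intro d hd s hs
    simp only [List.foldl_cons]
    by_cases hc : d.contains t = true
    · rw [if_pos hc]
      apply ih d hd
      rcases hs with hs | hs
      · rcases List.mem_cons.mp hs with rfl | hs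
        · exact Or.inr hc
        · exact Or.inl hs
      · exact Or.inr hs
    · rw [if_neg hc]
      apply ih (d.insert t (f t))
      · intro u hu
        by_cases hut : u = t
        · subst hut; simp [PySem.Dict.getD_insert_self]
        · rw [PySem.Dict.getD_insert]
          rw [if_neg hut]
          apply hd
          rw [PySem.Dict.contains_insert] at hu
          simpa [hut] using hu
      · rcases hs with hs | hs
        · rcases List.mem_cons.mp hs with rfl | hs
          · exact Or.inr (by simp [PySem.Dict.contains_insert_self])
          · exact Or.inl hs
        · exact Or.inr (by simp [PySem.Dict.contains_insert, hs])

theorem unique_tags_a_items (ct : List (String × List String)) (tweet : List String)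
    (hnd : (ct.map Prod.fst).Nodup) :
    unique_tags__py ct tweet
      = (ct.map (fun e => (e.1, pvKept ct tweet e.2))).filter (fun p => !p.2.isEmpty) := by
  have hmfnd : ((ct.map (fun e => (e.1, pvKept ct tweet e.2))).map Prod.fst).Nodup := by
    rw [List.map_map]
    exact hnd
  -- phase 1: every value becomes the tweet tags it contains
  have h1 : (PySem.Dict.mk ct).keys.foldl (fun d key =>
        let common := tweet.foldl (fun cs i =>
            if (d.getD key []).contains i then cs ++ [i] else cs) ([] : List String)
        d.insert key common) (PySem.Dict.mk ct) = ⟨pvState ct tweet []⟩ := by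
    have hk := pvKeyfold
      (fun d key =>
        let common := tweet.foldl (fun cs i =>
            if (d.getD key []).contains i then cs ++ [i] else cs) ([] : List String)
        d.insert key common)
      (fun k v => some (tweet.filter (fun i => v.contains i)))
      (by
        intro pre k v suf hnd'
        have hget : (PySem.Dict.mk (pre ++ (k, v) :: suf)).getD k [] = v :=
          PySem.Dict.getD_of_mem_items _ (by simp) hnd' []
        show (PySem.Dict.mk (pre ++ (k, v) :: suf)).insert k
            (tweet.foldl (fun cs i =>
              if ((PySem.Dict.mk (pre ++ (k, v) :: suf)).getD k []).contains i then cs ++ [i] else cs) []) = _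
        rw [hget]
        rw [PySem.List.foldl_append_if (fun i => v.contains i) (fun i => i) tweet []]
        apply PySem.Dict.ext
        have hcont : (PySem.Dict.mk (pre ++ (k, v) :: suf)).contains k = true := by
          rw [PySem.Dict.contains_iff_mem_keys]
          simp [PySem.Dict.keys]
        rw [PySem.Dict.items_insert_of_contains _ _ hcont]
        simp only [PySem.Dict.items]
        rw [pvMapUpdate pre suf k v _ hnd']
        simp [pvToEnt])
      ct [] (by simpa using hnd)
    simp only [List.nil_append] at hk
    rw [show (PySem.Dict.mk ct).keys = ct.map Prod.fst from rfl, hk, pvFlatMapSome]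
    rfl
  have h2 := pvPhase2 ct tweet hnd tweet [] rfl
  -- the collected empty candidates are exactly the keys with an empty final value
  have hemp : (PySem.Dict.mk (ct.map (fun e => (e.1, pvKept ct tweet e.2)))).keys.foldl
        (fun es e => if ((PySem.Dict.mk (ct.map (fun e => (e.1, pvKept ct tweet e.2)))).getD e []).length == 0
          then es ++ [e] else es) ([] : List String)
      = ((ct.map (fun e => (e.1, pvKept ct tweet e.2))).filter (fun p => p.2.length == 0)).map Prod.fst := by
    rw [show (PySem.Dict.mk (ct.map (fun e => (e.1, pvKept ct tweet e.2)))).keys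
        = (ct.map (fun e => (e.1, pvKept ct tweet e.2))).map Prod.fst from rfl, List.foldl_map]
    rw [PySem.List.foldl_congr_mem _ _
      (fun es (p : String × List String) => if p.2.length == 0 then es ++ [p.1] else es) []
      (by
        intro acc x hx
        rw [PySem.Dict.getD_of_mem_items _ (k := x.1) (v := x.2) (by simpa using hx) hmfnd []])]
    rw [PySem.List.foldl_append_if (fun (p : String × List String) => p.2.length == 0) Prod.fst]
    simp
  unfold unique_tags__py
  simp only []
  rw [h1, h2, hemp, pvEraseFold]
  simp only [PySem.Dict.items]
  apply List.filter_congr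
  intro p hp
  congr 1
  cases he : p.2.isEmpty with
  | true =>
    have hpe : p.2.length == 0 := by
      cases hv : p.2
      · simp
      · rw [hv] at he; simp at he
    apply List.elem_eq_true_of_mem
    exact List.mem_map_of_mem (List.mem_filter.mpr ⟨hp, hpe⟩)
  | false =>
    cases hb : (((ct.map (fun e => (e.1, pvKept ct tweet e.2))).filter
        (fun p => p.2.length == 0)).map Prod.fst).contains p.1 with
    | false => rfl
    | true =>
      exfalso
      have hmem : p.1 ∈ ((ct.map (fun e => (e.1, pvKept ct tweet e.2))).filter
          (fun p => p.2.length == 0)).map Prod.fst := by simpa using hb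
      obtain ⟨q, hq, hq1⟩ := List.mem_map.mp hmem
      have hqm := List.mem_filter.mp hq
      have hqp : q = p := by
        have hinj := List.inj_on_of_nodup_map hmfnd
        exact hinj (hqm.1) hp hq1
      rw [hqp] at hqm
      have : p.2 = [] := by simpa using hqm.2
      rw [this] at he
      simp at he

theorem unique_tags_b_items (ct : List (String × List String)) (tweet : List String)
    (hnd : (ct.map Prod.fst).Nodup) :
    unique_tags__py_alt ct tweet
      = ct.flatMap (fun e =>
          let l := pvKept ct tweet e.2
          if l.isEmpty then [] else [(e.1, l)]) := by
  unfold unique_tags__py_alt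
  simp only []
  set ocf : String → Int := fun t => (PySem.Dict.mk ct).values.foldl
      (fun c tags => if tags.contains t then c + 1 else c) (0 : Int) with hocf
  have hocval : ∀ t, ocf t = (pvOwners ct t : Int) := by
    intro t
    rw [hocf]
    show (ct.map Prod.snd).foldl (fun c tags => if tags.contains t then c + 1 else c) (0 : Int) = _
    rw [List.foldl_map, PySem.List.foldl_count_if]
    simp [pvOwners]
  have hoc : ∀ t ∈ tweet,
      (tweet.foldl (fun oc t => if oc.contains t then oc else oc.insert t (ocf t))
        (PySem.Dict.empty : PySem.Dict String Int)).getD t 0 = (pvOwners ct t : Int) := by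
    intro t ht
    rw [pvMemo ocf tweet PySem.Dict.empty
      (by intro u hu; rw [PySem.Dict.contains_empty] at hu; exact absurd hu (by simp))
      t (Or.inl ht)]
    exact hocval t
  set oc := tweet.foldl (fun oc t => if oc.contains t then oc else oc.insert t (ocf t))
      (PySem.Dict.empty : PySem.Dict String Int) with hocd
  have hk := pvKeyfold
    (fun d name =>
      let kept := tweet.filter (fun t => (d.getD name []).contains t && (oc.getD t 0 == 1))
      if kept.isEmpty then d.erase name else d.insert name kept)
    (fun name v =>
      let kept := tweet.filter (fun t => v.contains t && (oc.getD t 0 == 1))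
      if kept.isEmpty then none else some kept)
    (by
      intro pre k v suf hnd'
      have hget : (PySem.Dict.mk (pre ++ (k, v) :: suf)).getD k [] = v :=
        PySem.Dict.getD_of_mem_items _ (by simp) hnd' []
      show (let kept := tweet.filter (fun t =>
            ((PySem.Dict.mk (pre ++ (k, v) :: suf)).getD k []).contains t && (oc.getD t 0 == 1))
          if kept.isEmpty then (PySem.Dict.mk (pre ++ (k, v) :: suf)).erase k
          else (PySem.Dict.mk (pre ++ (k, v) :: suf)).insert k kept) = _
      rw [hget]
      simp only []
      cases hke : (tweet.filter (fun t => v.contains t && (oc.getD t 0 == 1))).isEmpty with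
      | true =>
        rw [if_pos rfl]
        apply PySem.Dict.ext
        show (pre ++ (k, v) :: suf).filter (fun p => !(p.1 == k)) = _
        rw [pvFilterNe pre suf k v hnd']
        simp [pvToEnt, hke]
      | false =>
        rw [if_neg (by simp)]
        apply PySem.Dict.ext
        have hcont : (PySem.Dict.mk (pre ++ (k, v) :: suf)).contains k = true := by
          rw [PySem.Dict.contains_iff_mem_keys]
          simp [PySem.Dict.keys]
        rw [PySem.Dict.items_insert_of_contains _ _ hcont]
        simp only [PySem.Dict.items]
        rw [pvMapUpdate pre suf k v _ hnd']
        simp [pvToEnt, hke])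
    ct [] (by simpa using hnd)
  simp only [List.nil_append] at hk
  rw [show (PySem.Dict.mk ct).keys = ct.map Prod.fst from rfl, hk]
  simp only [PySem.Dict.items]
  apply pvFlatMapCongr
  intro e he
  have hkept : tweet.filter (fun t => e.2.contains t && (oc.getD t 0 == 1)) = pvKept ct tweet e.2 := by
    unfold pvKept
    rw [List.filter_filter]
    apply List.filter_congr
    intro t ht
    cases hct : e.2.contains t with
    | false => simp [hct]
    | true =>
      simp only [hct, Bool.true_and]
      rw [hoc t ht]
      have howner : 1 ≤ pvOwners ct t := by
        unfold pvOwners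
        rw [Nat.succ_le_iff, List.countP_pos_iff]
        exact ⟨e, he, hct⟩
      by_cases hgt : 1 < pvOwners ct t
      · have hne : (pvOwners ct t : Int) ≠ 1 := by
          have : (1 : Int) < (pvOwners ct t : Int) := by exact_mod_cast hgt
          omega
        simp [pvMulti, hgt, hne]
      · have heq : pvOwners ct t = 1 := by omega
        simp [pvMulti, hgt, heq]
  simp only [hkept]
  cases hke : (pvKept ct tweet e.2).isEmpty <;> simp [pvToEnt, hke]

theorem pvMapFilterFlat (ct : List (String × List String)) (F : String × List String → String × List String) :
    (ct.map F).filter (fun p => !p.2.isEmpty)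
      = ct.flatMap (fun e => if (F e).2.isEmpty then [] else [F e]) := by
  induction ct with
  | nil => rfl
  | cons e ct ih =>
    simp only [List.map_cons, List.filter_cons, List.flatMap_cons, ← ih]
    cases h : (F e).2.isEmpty <;> simp [h]

-- ===== VERDICT (by name: the statement is the Claim_ definition above) =====
theorem unique_tags__py_spec : Claim_equal_unique_tags__py := by
  intro ct tweet _ hpre
  unfold Spec_unique_tags__py
  rw [unique_tags_a_items ct tweet hpre, unique_tags_b_items ct tweet hpre,
    pvMapFilterFlat ct (fun e => (e.1, pvKept ct tweet e.2))]
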